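-- pv_equiv track=rewrite | github.com/danlesko/Graph-Searching-In-Python | search_stolen.py | dfs
-- ===== SOURCE A (Python) =====
-- def dfs(graph, end, stack):
--     while stack:
--         currentNode = {}
--         start, visited = stack.pop()
--         if start in graph:
--             currentNode = graph[start]
--             del graph[start]
--
--         if(start == end):
--             return visited
--         else:
--             for key, value in sorted(currentNode.items(), reverse=True):
--                 stack.append((str(key), visited + [key]))
--
--     return list()
-- ===== SOURCE B (Python) =====
-- def dfs(graph, end, stack):
--     # Recursive DFS; return-value equivalent to the iterative version.
--     # Mutates `graph` (del) like the original; does not consume `stack`.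
--     def recurse(node, path):
--         if node in graph:
--             neighbors = graph[node]
--             del graph[node]
--         else:
--             neighbors = {}
--         if node == end:
--             return path
--         for key in sorted(neighbors):
--             found = recurse(key, path + [key])
--             if found is not None:
--                 return found
--         return None
--
--     for node, path in reversed(stack):
--         found = recurse(node, path)
--         if found is not None:
--             return found
--     return []
-- ===== Notes on version B (the rewrite author's own statement) =====
-- stated objective: alternative
-- what changed: Replaces the explicit worklist while-loop (pop last, push reverse-sorted neighbours) by a recursive DFS helper that tries sorted neighbours in ascending order and propagates the first found path, iterating the initial stack from its last entry; graph deletions are preserved, but the stack argument is no longer consumed (return value identical).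
import Mathlib
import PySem

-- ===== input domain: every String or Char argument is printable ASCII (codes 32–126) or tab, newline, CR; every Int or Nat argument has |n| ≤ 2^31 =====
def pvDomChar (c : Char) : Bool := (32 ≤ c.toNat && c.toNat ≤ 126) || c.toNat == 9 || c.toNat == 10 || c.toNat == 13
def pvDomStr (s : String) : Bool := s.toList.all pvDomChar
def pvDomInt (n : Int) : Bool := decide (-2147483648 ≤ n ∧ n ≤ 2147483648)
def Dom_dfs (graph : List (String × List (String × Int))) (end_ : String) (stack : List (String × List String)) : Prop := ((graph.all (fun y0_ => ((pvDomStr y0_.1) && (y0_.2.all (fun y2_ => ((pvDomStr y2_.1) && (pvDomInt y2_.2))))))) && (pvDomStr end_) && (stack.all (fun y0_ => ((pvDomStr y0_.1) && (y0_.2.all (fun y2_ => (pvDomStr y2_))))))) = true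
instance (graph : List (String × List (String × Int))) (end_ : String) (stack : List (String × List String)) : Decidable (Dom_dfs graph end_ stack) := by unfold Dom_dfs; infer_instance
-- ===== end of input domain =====

-- B replaces the explicit worklist loop by a recursive DFS helper over ascending sorted
-- neighbours (an alternative decomposition, not claimed faster); A also mutates its
-- `graph` and `stack` arguments in place — the equivalence proved here is about the
-- RETURN value only (B performs the same graph deletions but does not consume `stack`).

-- ===== PORT A =====
-- A's graph and neighbour dicts: modelled with PySem.Dict built from the assoc lists.
-- Python dict keys are unique, so sorted(items, reverse=True) orders by the key alone:
-- ported with key = fst.  str(key) is the identity on the String keys.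
-- While-loop state: (graph, stack); stack.pop() = PySem.List.pop?.
-- (termination helper for both ports: deleting a present key shrinks the dict)
theorem size_erase_lt {ν : Type} (g : PySem.Dict String ν) (k : String)
    (hc : g.contains k = true) : (g.erase k).size < g.size := by
  simp only [PySem.Dict.size, PySem.Dict.erase]
  exact List.length_filter_lt_length_iff_exists.mpr (by
    rcases List.any_eq_true.mp hc with ⟨p, hp1, hp2⟩
    exact ⟨p, hp1, by simp [hp2]⟩)

def dfsLoop (e : String) (g : PySem.Dict String (List (String × Int))) (stack : List (String × List String)) : List String :=
  match hp : PySem.List.pop? stack with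
  | none => []
  | some ((start, visited), rest) =>
    let currentNode : List (String × Int) := if g.contains start then (g.get? start).getD [] else []
    let g' : PySem.Dict String (List (String × Int)) := if g.contains start then g.erase start else g
    if start == e then visited
    else dfsLoop e g'
      (rest ++ (PySem.List.sorted (PySem.Dict.ofList currentNode).items (fun q => q.1) true).map
        (fun q => (q.1, visited ++ [q.1])))
termination_by (g.size, stack.length)
decreasing_by
  have hlen : rest.length + 1 = stack.length := PySem.List.length_of_pop?_eq_some _ hp
  by_cases hc : g.contains start
  · simp only [hc]
    exact Prod.Lex.left _ _ (size_erase_lt g start hc)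
  · simp only [hc]
    have h0 : (PySem.List.sorted (PySem.Dict.ofList ([] : List (String × Int))).items
        (fun q => q.1) true) = [] := rfl
    simp only [Bool.false_eq_true, dite_false, h0, List.map_nil, List.append_nil]
    exact Prod.Lex.right _ (by omega)

def dfs (graph : List (String × List (String × Int))) (end_ : String) (stack : List (String × List String)) : List String :=
  dfsLoop end_ (PySem.Dict.ofList graph) stack

-- ===== PORT B =====
-- recurse(node, path): take and delete the node's neighbours (if present), return path
-- on node == end, otherwise try sorted neighbours ascending, first non-None wins.
-- The mutated graph is threaded through explicitly; the Nat argument is a fuel bound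
-- (graph size + 1 always suffices — proved below) that only makes the recursion total.
mutual
def recB (e : String) (f : Nat) (g : PySem.Dict String (List (String × Int))) (node : String) (path : List String) : Option (List String) × PySem.Dict String (List (String × Int)) :=
  match f with
  | 0 => (none, g)
  | Nat.succ f =>
    let neighbors : List (String × Int) := if g.contains node then (g.get? node).getD [] else []
    let g1 : PySem.Dict String (List (String × Int)) := if g.contains node then g.erase node else g
    if node == e then (some path, g1)
    else recList e f g1 ((PySem.List.sorted (PySem.Dict.ofList neighbors).keys (fun k => k)).map
      (fun k => (k, path ++ [k])))
termination_by (f, 0)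

def recList (e : String) (f : Nat) (g : PySem.Dict String (List (String × Int))) (cs : List (String × List String)) : Option (List String) × PySem.Dict String (List (String × Int)) :=
  match cs with
  | [] => (none, g)
  | (n, p) :: cs =>
    match recB e f g n p with
    | (some r, g') => (some r, g')
    | (none, g') => recList e f g' cs
termination_by (f, cs.length + 1)
end

-- for node, path in reversed(stack): first found path wins, else []
def dfsOuter (e : String) : PySem.Dict String (List (String × Int)) → List (String × List String) → List String
  | _, [] => []
  | g, (n, p) :: rest =>
    match recB e (g.size + 1) g n p with
    | (some r, _) => r
    | (none, g') => dfsOuter e g' rest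

def dfs_alt (graph : List (String × List (String × Int))) (end_ : String) (stack : List (String × List String)) : List String :=
  dfsOuter end_ (PySem.Dict.ofList graph) stack.reverse

-- ===== PRECONDITION & SPEC =====
def Spec_dfs (graph : List (String × List (String × Int))) (end_ : String) (stack : List (String × List String)) (out : List String) : Prop := out = dfs_alt graph end_ stack
instance (graph : List (String × List (String × Int))) (end_ : String) (stack : List (String × List String)) (out : List String) : Decidable (Spec_dfs graph end_ stack out) := by unfold Spec_dfs; infer_instance

-- ===== CLAIM (what is proved, stated in full; the proofs are below) =====
def Claim_equal_dfs : Prop := ∀ (graph : List (String × List (String × Int))) (end_ : String) (stack : List (String × List String)), Dom_dfs graph end_ stack → Spec_dfs graph end_ stack (dfs graph end_ stack)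

-- ===== LEMMAS AND PROOFS =====

theorem size_erase_le {ν : Type} (g : PySem.Dict String ν) (k : String) :
    (g.erase k).size ≤ g.size := by
  simp only [PySem.Dict.size, PySem.Dict.erase]
  exact List.length_filter_le _ _

theorem recList_size_of (e : String) (f : Nat)
    (hB : ∀ g n p, ((recB e f g n p).2.size ≤ g.size)) :
    ∀ cs g, ((recList e f g cs).2.size ≤ g.size) := by
  intro cs
  induction cs with
  | nil => intro g; simp [recList]
  | cons c cs ih =>
    intro g
    obtain ⟨n, p⟩ := c
    rw [recList]
    rcases hr : recB e f g n p with ⟨o, g'⟩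
    have hg' : g'.size ≤ g.size := by have := hB g n p; rw [hr] at this; exact this
    cases o with
    | some r => simpa using hg'
    | none => simpa using le_trans (ih g') hg'

theorem recB_size_le (e : String) : ∀ f g n p, ((recB e f g n p).2.size ≤ g.size) := by
  intro f
  induction f with
  | zero => intro g n p; simp [recB]
  | succ f ih =>
    intro g n p
    rw [recB]
    by_cases hc : g.contains n
    · simp only [hc, if_true]
      split
      · exact size_erase_le g n
      · exact le_trans (recList_size_of e f ih _ _) (size_erase_le g n)
    · simp only [hc]
      split
      · exact le_refl _
      · exact recList_size_of e f ih _ _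

theorem recList_fuel_of (e : String) (f1 f2 : Nat)
    (hB : ∀ g n p, g.size < f1 → g.size < f2 → recB e f1 g n p = recB e f2 g n p) :
    ∀ cs g, g.size < f1 → g.size < f2 → recList e f1 g cs = recList e f2 g cs := by
  intro cs
  induction cs with
  | nil => intro g h1 h2; simp [recList]
  | cons c cs ih =>
    intro g h1 h2
    obtain ⟨n, p⟩ := c
    rw [recList, recList, ← hB g n p h1 h2]
    rcases hr : recB e f1 g n p with ⟨o, g'⟩
    have hg' : g'.size ≤ g.size := by
      have := recB_size_le e f1 g n p; rw [hr] at this; exact this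
    cases o with
    | some r => rfl
    | none => exact ih g' (lt_of_le_of_lt hg' h1) (lt_of_le_of_lt hg' h2)

theorem recB_fuel (e : String) : ∀ f1 f2 g n p, g.size < f1 → g.size < f2 →
    recB e f1 g n p = recB e f2 g n p := by
  intro f1
  induction f1 with
  | zero => intro f2 g n p h1 _; exact absurd h1 (Nat.not_lt_zero _)
  | succ f ih =>
    intro f2 g n p h1 h2
    cases f2 with
    | zero => exact absurd h2 (Nat.not_lt_zero _)
    | succ f2' =>
      rw [recB, recB]
      by_cases he : (n == e) = true
      · simp only [he, if_true]
      · simp only [he, Bool.false_eq_true, if_false]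
        by_cases hc : g.contains n
        · simp only [hc, if_true]
          have hg1 : (g.erase n).size < g.size := size_erase_lt g n hc
          exact recList_fuel_of e f f2' (fun g n p ha hb => ih f2' g n p ha hb) _ _
            (by omega) (by omega)
        · simp only [hc, Bool.false_eq_true, if_false]
          have h0 : (PySem.List.sorted (PySem.Dict.ofList ([] : List (String × Int))).keys
              (fun k => k)) = [] := rfl
          rw [h0]
          simp [recList]

theorem recList_fuel (e : String) : ∀ f1 f2 cs g, g.size < f1 → g.size < f2 →
    recList e f1 g cs = recList e f2 g cs :=
  fun f1 f2 => recList_fuel_of e f1 f2 (fun g n p h1 h2 => recB_fuel e f1 f2 g n p h1 h2)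

theorem recList_append (e : String) (f : Nat) (cs1 cs2 : List (String × List String)) :
    ∀ g, recList e f g (cs1 ++ cs2) =
      match recList e f g cs1 with
      | (some r, g') => (some r, g')
      | (none, g') => recList e f g' cs2 := by
  induction cs1 with
  | nil => intro g; simp [recList]
  | cons c cs ih =>
    intro g
    obtain ⟨n, p⟩ := c
    rw [List.cons_append, recList, recList]
    rcases hr : recB e f g n p with ⟨o, g'⟩
    cases o with
    | some r => rfl
    | none => exact ih g'

theorem children_eq (cn : List (String × Int)) (v : List String) :
    ((PySem.List.sorted (PySem.Dict.ofList cn).items (fun q => q.1) true).map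
        (fun q => (q.1, v ++ [q.1]))) =
      ((PySem.List.sorted (PySem.Dict.ofList cn).keys (fun k => k)).map
        (fun k => (k, v ++ [k]))).reverse := by
  set D := PySem.List.sorted (PySem.Dict.ofList cn).items (fun q => q.1) true with hD
  have hperm : (D.reverse.map (fun q : String × Int => q.1)).Perm (PySem.Dict.ofList cn).keys := by
    have h1 : D.reverse.Perm (PySem.Dict.ofList cn).items :=
      (D.reverse_perm).trans (PySem.List.sorted_perm _ _ _)
    simpa [PySem.Dict.keys] using h1.map (fun q : String × Int => q.1)
  have hnd : (D.reverse.map (fun q : String × Int => q.1)).Nodup :=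
    hperm.symm.nodup (PySem.Dict.nodup_keys_ofList cn)
  have hle : D.reverse.Pairwise (fun a b : String × Int => a.1 ≤ b.1) := by
    rw [List.pairwise_reverse]
    exact PySem.List.sorted_pairwise_rev (PySem.Dict.ofList cn).items (fun q => q.1)
  have hlt : (D.reverse.map (fun q : String × Int => q.1)).Pairwise (· < ·) := by
    have hle' : (D.reverse.map (fun q : String × Int => q.1)).Pairwise (· ≤ ·) :=
      (List.pairwise_map).mpr hle
    exact (hle'.and hnd).imp (fun h => lt_of_le_of_ne h.1 h.2)
  have hkeys : PySem.List.sorted (PySem.Dict.ofList cn).keys (fun k => k) =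
      D.reverse.map (fun q : String × Int => q.1) :=
    PySem.List.sorted_eq_of_perm_of_pairwise_lt _ _ _ hperm hlt
  rw [hkeys, List.map_map, ← List.map_reverse, List.reverse_reverse]
  rfl

theorem dfsLoop_nil (e : String) (g : PySem.Dict String (List (String × Int))) :
    dfsLoop e g [] = [] := by
  rw [dfsLoop]
  rfl

theorem main_lemma (e : String) (g : PySem.Dict String (List (String × Int)))
    (cs rest : List (String × List String)) (f : Nat) (hf : g.size < f) :
    dfsLoop e g (rest ++ cs.reverse) =
      (match recList e f g cs with
       | (some r, _) => r
       | (none, g') => dfsLoop e g' rest) := by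
  match cs with
  | [] => simp [recList]
  | (n, p) :: cs' =>
    have hrw : rest ++ ((n, p) :: cs').reverse = (rest ++ cs'.reverse) ++ [(n, p)] := by simp
    rw [hrw, dfsLoop]
    have hpop : PySem.List.pop? ((rest ++ cs'.reverse) ++ [(n, p)]) =
        some ((n, p), rest ++ cs'.reverse) := PySem.List.pop?_last _ _
    rw [recList]
    cases f with
    | zero => exact absurd hf (Nat.not_lt_zero _)
    | succ f' =>
      rw [recB]
      split
      · next heq => rw [hpop] at heq; exact absurd heq (by simp)
      · next start visited rest' heq =>
        rw [hpop] at heq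
        simp only [Option.some.injEq, Prod.mk.injEq] at heq
        obtain ⟨⟨heq11, heq12⟩, heq2⟩ := heq
        subst heq11; subst heq12; subst heq2
        by_cases he : (n == e) = true
        · simp only [he, if_true]
        · simp only [he, Bool.false_eq_true, if_false]
          by_cases hc : g.contains n
          · simp only [hc, if_true]
            have hg1 : (g.erase n).size < g.size := size_erase_lt g n hc
            rw [children_eq ((g.get? n).getD []) p]
            have hstk : (rest ++ cs'.reverse) ++
                (((PySem.List.sorted (PySem.Dict.ofList ((g.get? n).getD [])).keys
                  (fun k => k)).map (fun k => (k, p ++ [k]))).reverse) =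
                rest ++ (((PySem.List.sorted (PySem.Dict.ofList ((g.get? n).getD [])).keys
                  (fun k => k)).map (fun k => (k, p ++ [k]))) ++ cs').reverse := by
              simp
            rw [hstk]
            rw [main_lemma e (g.erase n) _ rest (Nat.succ f') (by omega)]
            rw [recList_append]
            rw [recList_fuel e f' (Nat.succ f') _ (g.erase n) (by omega) (by omega)]
          · simp only [hc, Bool.false_eq_true, if_false]
            have h0 : (PySem.List.sorted (PySem.Dict.ofList ([] : List (String × Int))).items
                (fun q => q.1) true) = [] := rfl
            rw [h0]
            simp only [List.map_nil, List.append_nil]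
            have h0' : (PySem.List.sorted (PySem.Dict.ofList ([] : List (String × Int))).keys
                (fun k => k)) = [] := rfl
            rw [h0']
            simp only [List.map_nil]
            rw [recList]
            exact main_lemma e g cs' rest (Nat.succ f') hf
  termination_by (g.size, cs.length)
  decreasing_by
  · exact Prod.Lex.left _ _ (size_erase_lt g n hc)
  · exact Prod.Lex.right _ (by simp)

theorem outer_eq (e : String) : ∀ cs g f, g.size < f →
    dfsOuter e g cs =
      (match recList e f g cs with
       | (some r, _) => r
       | (none, _) => []) := by
  intro cs
  induction cs with
  | nil => intro g f hf; simp [dfsOuter, recList]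
  | cons c cs ih =>
    intro g f hf
    obtain ⟨n, p⟩ := c
    rw [dfsOuter, recList]
    rw [recB_fuel e (g.size + 1) f g n p (Nat.lt_succ_self _) hf]
    rcases hr : recB e f g n p with ⟨o, g'⟩
    have hg' : g'.size ≤ g.size := by
      have := recB_size_le e f g n p; rw [hr] at this; exact this
    cases o with
    | some r => rfl
    | none => exact ih g' f (lt_of_le_of_lt hg' hf)

-- ===== VERDICT (by name: the statement is the Claim_ definition above) =====
theorem dfs_spec : Claim_equal_dfs := by
  intro graph end_ stack _
  unfold Spec_dfs dfs dfs_alt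
  set G := PySem.Dict.ofList graph with hG
  have h1 := main_lemma end_ G stack.reverse [] (G.size + 1) (Nat.lt_succ_self _)
  rw [List.reverse_reverse, List.nil_append] at h1
  have h2 := outer_eq end_ stack.reverse G (G.size + 1) (Nat.lt_succ_self _)
  rw [h1, h2]
  rcases hr : recList end_ (G.size + 1) G stack.reverse with ⟨o, g'⟩
  cases o with
  | some r => rfl
  | none => exact dfsLoop_nil end_ g'
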